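-- pv_equiv track=rewrite | github.com/rorik/UBU-Algoritmia | p6/solution.py | divide_y_venceras_recursivo
-- ===== SOURCE A (Python) =====
-- import math
--
-- def divide_y_venceras_recursivo(inferior, superior=None, divisiones=2):
--     """
--     Dados los índices inferior y superior, genera la secuencia de índices
--     correspondiente a las llamadas recursivas que se realizan al dividir en
--     tantos subproblemas como el número de divisiones indicado.
--     Los subproblemas son de aproximadamente el mismo tamaño.
--     Si el número de elementos entre inferior y superior es menor que el número
--     de divisiones, se planteará un subproblema para cada elemento.
--     Los subproblemas se plantearán en orden ascendente: el primer problema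
--     contendrá inferior, el último contendrá superior.
--     Si el número de elementos no es múltiplo del número de divisiones, los
--     primeros subproblemas tendrán un elemento más que los últimos.
--     Si superior es None, el primer argumento recibido será superior e inferior
--     será 0.
--     """
--
--     if superior is None:
--         superior = inferior
--         inferior = 0
--
--     resultado = [(inferior, superior)]
--     if inferior != superior:
--         diff = superior - inferior + 1
--         if diff <= divisiones:
--             for i in range(diff):
--                 inf = inferior + i
--                 resultado.append((inf, inf))
--         else:
--             gap = math.floor(diff / divisiones)
--             remainder = diff - gap * divisiones
--             next_inf = inferior
--             for i in range(divisiones):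
--                 inf = next_inf
--                 sup = inf + gap - 1
--                 if remainder > 0:
--                     sup += 1
--                     remainder -= 1
--                 next_inf = sup + 1
--                 resultado.extend(divide_y_venceras_recursivo(inf, sup, divisiones))
--
--     return resultado
-- ===== SOURCE B (Python) =====
-- def divide_y_venceras_recursivo(inferior, superior=None, divisiones=2):
--     """Iterative re-implementation: explicit LIFO stack instead of recursion;
--     children are pushed in reverse so pops reproduce the pre-order sequence."""
--     if superior is None:
--         inferior, superior = 0, inferior
--
--     resultado = []
--     stack = [(inferior, superior)]
--     while stack:
--         inf, sup = stack.pop()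
--         resultado.append((inf, sup))
--         if inf != sup:
--             diff = sup - inf + 1
--             if diff <= divisiones:
--                 children = [(inf + i, inf + i) for i in range(diff)]
--             else:
--                 gap = diff // divisiones
--                 remainder = diff - gap * divisiones
--                 children = []
--                 next_inf = inf
--                 for _ in range(divisiones):
--                     lo = next_inf
--                     hi = lo + gap - 1
--                     if remainder > 0:
--                         hi += 1
--                         remainder -= 1
--                     next_inf = hi + 1
--                     children.append((lo, hi))
--             stack.extend(reversed(children))
--     return resultado
-- ===== Notes on version B (the rewrite author's own statement) =====
-- stated objective: alternative
-- what changed: Replaced A's recursion over subranges by an explicit stack-driven iteration: B pops a range, emits it, computes its child ranges once and pushes them in reverse, reproducing A's pre-order output without any recursion.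
import Mathlib
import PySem

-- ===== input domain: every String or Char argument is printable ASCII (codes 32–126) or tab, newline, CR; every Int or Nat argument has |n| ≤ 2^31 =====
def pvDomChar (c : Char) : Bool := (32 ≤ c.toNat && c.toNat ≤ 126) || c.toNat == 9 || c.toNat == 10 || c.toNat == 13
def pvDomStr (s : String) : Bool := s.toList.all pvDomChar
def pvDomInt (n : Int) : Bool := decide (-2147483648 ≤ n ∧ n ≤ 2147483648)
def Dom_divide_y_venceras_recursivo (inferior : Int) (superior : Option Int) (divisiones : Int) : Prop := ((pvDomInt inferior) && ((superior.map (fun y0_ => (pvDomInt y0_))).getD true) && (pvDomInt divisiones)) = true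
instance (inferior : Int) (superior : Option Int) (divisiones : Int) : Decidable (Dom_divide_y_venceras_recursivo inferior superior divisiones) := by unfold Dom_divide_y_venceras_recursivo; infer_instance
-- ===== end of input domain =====

-- B replaces A's recursion by an explicit LIFO stack iteration (children pushed in reverse)
-- producing the same pre-order list; objective: alternative decomposition, same cost.

-- the `superior is None` defaulting, shared by both ports
def pvRoot (inferior : Int) (superior : Option Int) : Int × Int :=
  match superior with | none => (0, inferior) | some s => (inferior, s)

-- ===== PORT A =====
-- body of one iteration of A's `for i in range(divisiones)` loop; `rec` is the recursive call
-- (state: (next_inf, remainder, resultado))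
def pvA_step (rec : Int → Int → List (Int × Int))
    (gap : Int) (st : Int × Int × List (Int × Int)) (_ : Int) : Int × Int × List (Int × Int) :=
  let inf := st.1
  let sup := inf + gap - 1
  let sup' := if st.2.1 > 0 then sup + 1 else sup
  let rem' := if st.2.1 > 0 then st.2.1 - 1 else st.2.1
  (sup' + 1, rem', st.2.2 ++ rec inf sup')

-- Literal port of A's recursion; `fuel` is only a totality guard (Python A recurses without
-- bound for divisiones ∈ {0,1} on a range with inferior < superior; those inputs are outside
-- Pre_): the top level supplies fuel that is proved sufficient on Pre_.
def pvA_go : Nat → Int → Int → Int → List (Int × Int)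
  | 0, _, _, _ => []
  | fuel+1, inferior, superior, divisiones =>
    let resultado : List (Int × Int) := [(inferior, superior)]
    if inferior ≠ superior then
      let diff := superior - inferior + 1
      if diff ≤ divisiones then
        -- for i in range(diff): resultado.append((inferior + i, inferior + i))
        (PySem.List.pyRange 0 diff 1).foldl
          (fun acc i => acc ++ [(inferior + i, inferior + i)]) resultado
      else
        let gap := PySem.Int.floordiv diff divisiones
        let remainder := diff - gap * divisiones
        ((PySem.List.pyRange 0 divisiones 1).foldl
          (pvA_step (fun a b => pvA_go fuel a b divisiones) gap)
          (inferior, remainder, resultado)).2.2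
    else resultado

def divide_y_venceras_recursivo (inferior : Int) (superior : Option Int) (divisiones : Int) : List (Int × Int) :=
  let p := pvRoot inferior superior
  pvA_go ((p.2 - p.1).toNat + 1) p.1 p.2 divisiones

-- ===== PORT B =====
-- body of one iteration of Source B's `for _ in range(divisiones)` loop
-- (state: (next_inf, remainder, children))
def pvB_step (gap : Int) (st : Int × Int × List (Int × Int)) (_ : Int) : Int × Int × List (Int × Int) :=
  let lo := st.1
  let hi := if st.2.1 > 0 then lo + gap else lo + gap - 1
  let rem' := if st.2.1 > 0 then st.2.1 - 1 else st.2.1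
  (hi + 1, rem', st.2.2 ++ [(lo, hi)])

-- children of a popped node: Source B's `if inf != sup:` block
def pvB_children (divisiones inf sup : Int) : List (Int × Int) :=
  if inf ≠ sup then
    let diff := sup - inf + 1
    if diff ≤ divisiones then
      (PySem.List.pyRange 0 diff 1).map (fun i => (inf + i, inf + i))
    else
      let gap := PySem.Int.floordiv diff divisiones
      let remainder := diff - gap * divisiones
      ((PySem.List.pyRange 0 divisiones 1).foldl (pvB_step gap) (inf, remainder, [])).2.2
  else []

-- Source B's `while stack:` loop. The stack is kept TOP-AT-HEAD: Python pops from the END and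
-- extends with `reversed(children)`, which is exactly popping the head and prepending the
-- children in order here. `fuel` is only a totality guard (Source B's loop, like A, runs forever
-- for divisiones ∈ {0,1} on a range with inferior < superior — outside Pre_); the top level
-- supplies fuel proved sufficient on Pre_.
def pvB_loop (divisiones : Int) : Nat → List (Int × Int) → List (Int × Int) → List (Int × Int)
  | 0, _, resultado => resultado
  | fuel+1, stack, resultado =>
    match stack with
    | [] => resultado
    | (inf, sup) :: rest =>
      pvB_loop divisiones fuel (pvB_children divisiones inf sup ++ rest) (resultado ++ [(inf, sup)])

def divide_y_venceras_recursivo_alt (inferior : Int) (superior : Option Int) (divisiones : Int) : List (Int × Int) :=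
  let p := pvRoot inferior superior
  pvB_loop divisiones (3 * (p.2 - p.1).toNat + 2) [p] []

-- ===== PRECONDITION & SPEC =====
-- Pre_ excludes exactly the inputs on which Python A does not return: with divisiones = 0 it
-- raises ZeroDivisionError and with divisiones = 1 it recurses forever, whenever the range
-- (after the superior-is-None defaulting) has inferior < superior. B raises/diverges there too.
def Pre_divide_y_venceras_recursivo (inferior : Int) (superior : Option Int) (divisiones : Int) : Prop :=
  ¬((divisiones = 0 ∨ divisiones = 1) ∧ (pvRoot inferior superior).1 < (pvRoot inferior superior).2)
instance (inferior : Int) (superior : Option Int) (divisiones : Int) : Decidable (Pre_divide_y_venceras_recursivo inferior superior divisiones) := by unfold Pre_divide_y_venceras_recursivo; infer_instance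

def pvWitness_divide_y_venceras_recursivo : Int × Option Int × Int := (0, some 7, 3)

def Spec_divide_y_venceras_recursivo (inferior : Int) (superior : Option Int) (divisiones : Int) (out : List (Int × Int)) : Prop := out = divide_y_venceras_recursivo_alt inferior superior divisiones
instance (inferior : Int) (superior : Option Int) (divisiones : Int) (out : List (Int × Int)) : Decidable (Spec_divide_y_venceras_recursivo inferior superior divisiones out) := by unfold Spec_divide_y_venceras_recursivo; infer_instance

-- ===== CLAIM (what is proved, stated in full; the proofs are below) =====
def Claim_equal_divide_y_venceras_recursivo : Prop := ∀ (inferior : Int) (superior : Option Int) (divisiones : Int), Dom_divide_y_venceras_recursivo inferior superior divisiones → Pre_divide_y_venceras_recursivo inferior superior divisiones → Spec_divide_y_venceras_recursivo inferior superior divisiones (divide_y_venceras_recursivo inferior superior divisiones)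

-- ===== LEMMAS AND PROOFS =====

-- a node (inf, sup) on which A's recursion (and B's loop) makes progress
def pvGood (divisiones inf sup : Int) : Prop := inf < sup → divisiones ≠ 0 ∧ divisiones ≠ 1

-- A's expansion of one node with its canonical (sufficient) fuel
def pvExp (divisiones inf sup : Int) : List (Int × Int) :=
  pvA_go ((sup - inf).toNat + 1) inf sup divisiones

-- invariant of B's children loop: the produced segments have width gap-1 or gap,
-- their sizes sum to gap·len + remainder, and there is one per iteration
theorem pvB_fold_spec (gap : Int) (hgap : 1 ≤ gap) (l : List Int) :
    ∀ (ni rem : Int) (acc : List (Int × Int)), 0 ≤ rem → rem ≤ (l.length : Int) →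
    ∃ cs, (l.foldl (pvB_step gap) (ni, rem, acc)).2.2 = acc ++ cs ∧
      (∀ p ∈ cs, p.1 ≤ p.2 ∧ p.2 - p.1 ≤ gap) ∧
      (cs.map (fun p => p.2 - p.1 + 1)).sum = gap * l.length + rem ∧
      cs.length = l.length := by
  induction l with
  | nil =>
    intro ni rem acc h0 h1
    simp only [List.length_nil, Nat.cast_zero] at h1
    exact ⟨[], by simp, by simp, by simp; omega, by simp⟩
  | cons x t ih =>
    intro ni rem acc h0 h1
    simp only [List.length_cons] at h1
    by_cases hr : rem > 0
    · obtain ⟨cs, hcs, hmem, hsum, hlen⟩ :=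
        ih (ni + gap + 1) (rem - 1) (acc ++ [(ni, ni + gap)]) (by omega) (by push_cast at h1 ⊢; omega)
      refine ⟨(ni, ni + gap) :: cs, ?_, ?_, ?_, by simp [hlen]⟩
      · simpa [pvB_step, hr, List.append_assoc] using hcs
      · intro p hp
        rw [List.mem_cons] at hp
        rcases hp with rfl | hp
        · exact ⟨by show ni ≤ ni + gap; omega, by show ni + gap - ni ≤ gap; omega⟩
        · exact hmem p hp
      · simp only [List.map_cons, List.sum_cons, hsum, List.length_cons]
        push_cast; ring
    · have hrem : rem = 0 := by omega
      obtain ⟨cs, hcs, hmem, hsum, hlen⟩ :=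
        ih (ni + gap) rem (acc ++ [(ni, ni + gap - 1)]) h0 (by push_cast at h1 ⊢; omega)
      refine ⟨(ni, ni + gap - 1) :: cs, ?_, ?_, ?_, by simp [hlen]⟩
      · simpa [pvB_step, hr, List.append_assoc] using hcs
      · intro p hp
        rw [List.mem_cons] at hp
        rcases hp with rfl | hp
        · exact ⟨by show ni ≤ ni + gap - 1; omega, by show ni + gap - 1 - ni ≤ gap; omega⟩
        · exact hmem p hp
      · simp only [List.map_cons, List.sum_cons, hsum, List.length_cons]
        push_cast; ring

-- A's subdivision loop and B's children loop walk the same sequence of segments: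
-- A's accumulator is always res0 ++ (expansion of B's accumulator)
theorem pvAB_fold (rec : Int → Int → List (Int × Int)) (gap : Int) (l : List Int) :
    ∀ (ni rem : Int) (accB res0 : List (Int × Int)),
    l.foldl (pvA_step rec gap) (ni, rem, res0 ++ accB.flatMap (fun p => rec p.1 p.2)) =
      ((l.foldl (pvB_step gap) (ni, rem, accB)).1,
       (l.foldl (pvB_step gap) (ni, rem, accB)).2.1,
       res0 ++ ((l.foldl (pvB_step gap) (ni, rem, accB)).2.2).flatMap (fun p => rec p.1 p.2)) := by
  induction l with
  | nil => intro ni rem accB res0; simp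
  | cons x t ih =>
    intro ni rem accB res0
    by_cases hr : rem > 0
    · have e1 : ni + gap - 1 + 1 = ni + gap := by ring
      simp only [List.foldl_cons, pvA_step, pvB_step, hr, if_pos, e1]
      have e2 : res0 ++ accB.flatMap (fun p => rec p.1 p.2) ++ rec ni (ni + gap) =
          res0 ++ (accB ++ [(ni, ni + gap)]).flatMap (fun p => rec p.1 p.2) := by
        simp [List.flatMap_append, List.append_assoc]
      rw [e2]; exact ih (ni + gap + 1) (rem - 1) (accB ++ [(ni, ni + gap)]) res0
    · simp only [List.foldl_cons, pvA_step, pvB_step, hr, if_false]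
      have e2 : res0 ++ accB.flatMap (fun p => rec p.1 p.2) ++ rec ni (ni + gap - 1) =
          res0 ++ (accB ++ [(ni, ni + gap - 1)]).flatMap (fun p => rec p.1 p.2) := by
        simp [List.flatMap_append, List.append_assoc]
      rw [e2]; exact ih (ni + gap - 1 + 1) rem (accB ++ [(ni, ni + gap - 1)]) res0

theorem pvB_children_le (div inf sup : Int) (h : sup ≤ inf) : pvB_children div inf sup = [] := by
  unfold pvB_children
  by_cases h1 : inf = sup
  · simp [h1]
  · rw [if_pos h1]
    by_cases h2 : sup - inf + 1 ≤ div
    · rw [if_pos h2, PySem.List.pyRange_one_eq_nil (by omega)]; simp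
    · rw [if_neg h2, PySem.List.pyRange_one_eq_nil (by omega)]; simp

theorem pvB_children_neg_div (div inf sup : Int) (h : div < 0) : pvB_children div inf sup = [] := by
  unfold pvB_children
  by_cases h1 : inf = sup
  · simp [h1]
  · rw [if_pos h1]
    by_cases h2 : sup - inf + 1 ≤ div
    · rw [if_pos h2, PySem.List.pyRange_one_eq_nil (by omega)]; simp
    · rw [if_neg h2, PySem.List.pyRange_one_eq_nil (by omega)]; simp

-- the recursive case of the children computation, with everything later proofs need
theorem pvB_children_rec (div inf sup : Int) (h1 : inf < sup) (h2 : ¬(sup - inf + 1 ≤ div))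
    (hdiv : 2 ≤ div) :
    (∀ p ∈ pvB_children div inf sup, p.1 ≤ p.2 ∧ p.2 - p.1 < sup - inf) ∧
    ((pvB_children div inf sup).map (fun p => p.2 - p.1 + 1)).sum = sup - inf + 1 ∧
    ((pvB_children div inf sup).length : Int) = div := by
  have hne : inf ≠ sup := by omega
  have hdpos : (0 : Int) < div := by omega
  set diff := sup - inf + 1 with hdiff
  have hd3 : 3 ≤ diff := by omega
  have hmod := PySem.Int.floordiv_mul_add_mod diff div
  have hmnn := PySem.Int.mod_nonneg diff hdpos
  have hmlt := PySem.Int.mod_lt diff hdpos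
  set gap := PySem.Int.floordiv diff div with hgap
  have hgap1 : 1 ≤ gap := by
    rw [hgap, PySem.Int.le_floordiv_iff_mul_le hdpos]; omega
  set rem := diff - gap * div with hrem
  have hrem0 : 0 ≤ rem := by omega
  have hremlt : rem < div := by omega
  have hlen : ((PySem.List.pyRange 0 div 1).length : Int) = div := by
    rw [PySem.List.length_pyRange_one]; omega
  obtain ⟨cs, hcs, hmem, hsum, hcl⟩ :=
    pvB_fold_spec gap hgap1 (PySem.List.pyRange 0 div 1) inf rem [] hrem0 (by omega)
  have hch : pvB_children div inf sup = cs := by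
    unfold pvB_children
    rw [if_pos hne, if_neg h2]
    simpa using hcs
  have hgaplt : gap < sup - inf := by
    have h2g : gap * 2 ≤ gap * div := by nlinarith
    nlinarith
  refine ⟨?_, ?_, ?_⟩
  · intro p hp
    rw [hch] at hp
    obtain ⟨hple, hplt⟩ := hmem p hp
    exact ⟨hple, by omega⟩
  · rw [hch, hsum, hlen]; omega
  · rw [hch, hcl]; exact hlen

theorem pvB_children_mem (div inf sup : Int) (hg : pvGood div inf sup) :
    ∀ p ∈ pvB_children div inf sup, p.1 ≤ p.2 ∧ p.2 - p.1 < sup - inf ∧ pvGood div p.1 p.2 := by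
  intro p hp
  by_cases hle : sup ≤ inf
  · rw [pvB_children_le div inf sup hle] at hp; exact absurd hp (List.not_mem_nil)
  · have h1 : inf < sup := by omega
    obtain ⟨hd0, hd1⟩ := hg h1
    by_cases hdn : div < 0
    · rw [pvB_children_neg_div div inf sup hdn] at hp; exact absurd hp (List.not_mem_nil)
    · have hdiv : 2 ≤ div := by omega
      by_cases h2 : sup - inf + 1 ≤ div
      · -- leaf subdivision: one singleton per element
        unfold pvB_children at hp
        rw [if_pos (by omega : inf ≠ sup), if_pos h2] at hp
        obtain ⟨i, hi, rfl⟩ := List.mem_map.mp hp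
        rw [PySem.List.mem_pyRange_one] at hi
        exact ⟨le_refl _, by omega, fun h => absurd h (by omega)⟩
      · obtain ⟨hmem, _, _⟩ := pvB_children_rec div inf sup h1 h2 hdiv
        obtain ⟨hple, hplt⟩ := hmem p hp
        exact ⟨hple, hplt, fun _ => ⟨hd0, hd1⟩⟩

-- one unfolding of A: the node, then the expansions of its children, in order
theorem pvA_expand (f : Nat) (div inf sup : Int) (hf : (sup - inf).toNat < f + 1) :
    pvA_go (f+1) inf sup div =
      (inf, sup) :: (pvB_children div inf sup).flatMap (fun p => pvA_go f p.1 p.2 div) := by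
  by_cases h1 : inf = sup
  · subst h1; simp [pvA_go, pvB_children]
  · by_cases h2 : sup - inf + 1 ≤ div
    · -- leaf branch
      simp only [pvA_go]
      rw [if_pos h1, if_pos h2]
      rw [PySem.List.foldl_append_singleton_eq_map (fun i => (inf + i, inf + i))]
      unfold pvB_children
      rw [if_pos h1, if_pos h2]
      by_cases h3 : sup - inf + 1 ≤ 0
      · rw [PySem.List.pyRange_one_eq_nil (by omega)]; simp
      · have hs : inf < sup := by
          rcases lt_or_gt_of_ne (fun h => h1 h) with h | h
          · exact h
          · omega
        obtain ⟨f, rfl⟩ : ∃ f', f = f' + 1 := ⟨f - 1, by omega⟩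
        simp only [List.flatMap_map]
        have : ∀ i ∈ PySem.List.pyRange 0 (sup - inf + 1) 1,
            (fun p : Int × Int => pvA_go (f+1) p.1 p.2 div) ((fun i => (inf + i, inf + i)) i)
              = [(inf + i, inf + i)] := by
          intro i _; simp [pvA_go]
        rw [List.flatMap_congr this]
        rw [← List.map_eq_flatMap]; rfl
    · -- recursive branch
      simp only [pvA_go]
      rw [if_pos h1, if_neg h2]
      have hinit : ([(inf, sup)] : List (Int × Int)) =
          [(inf, sup)] ++ ([] : List (Int × Int)).flatMap
            (fun p => pvA_go f p.1 p.2 div) := by simp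
      rw [hinit, pvAB_fold (fun a b => pvA_go f a b div)
        (PySem.Int.floordiv (sup - inf + 1) div) (PySem.List.pyRange 0 div 1)]
      unfold pvB_children
      rw [if_pos h1, if_neg h2]
      simp

-- any sufficient fuel computes the same list
theorem pvA_stable (n : Nat) : ∀ (div inf sup : Int), (sup - inf).toNat ≤ n → pvGood div inf sup →
    ∀ f g : Nat, (sup - inf).toNat < f → (sup - inf).toNat < g →
    pvA_go f inf sup div = pvA_go g inf sup div := by
  induction n using Nat.strong_induction_on with
  | _ n ih =>
    intro div inf sup hn hgood f g hf hg
    obtain ⟨f, rfl⟩ : ∃ f', f = f' + 1 := ⟨f - 1, by omega⟩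
    obtain ⟨g, rfl⟩ : ∃ g', g = g' + 1 := ⟨g - 1, by omega⟩
    rw [pvA_expand f div inf sup hf, pvA_expand g div inf sup hg]
    congr 1
    apply List.flatMap_congr
    intro p hp
    obtain ⟨hle, hlt, hpg⟩ := pvB_children_mem div inf sup hgood p hp
    exact ih (p.2 - p.1).toNat (by omega) div p.1 p.2 le_rfl hpg f g (by omega) (by omega)

theorem pvExp_eq (div inf sup : Int) (hg : pvGood div inf sup) :
    pvExp div inf sup =
      (inf, sup) :: (pvB_children div inf sup).flatMap (fun p => pvExp div p.1 p.2) := by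
  unfold pvExp
  rw [pvA_expand ((sup - inf).toNat) div inf sup (by omega)]
  congr 1
  apply List.flatMap_congr
  intro p hp
  obtain ⟨hle, hlt, hpg⟩ := pvB_children_mem div inf sup hg p hp
  exact pvA_stable ((sup - inf).toNat) div p.1 p.2 (by omega) hpg _ _ (by omega) (by omega)

theorem pvExp_len_pos (div inf sup : Int) (hg : pvGood div inf sup) :
    1 ≤ (pvExp div inf sup).length := by
  rw [pvExp_eq div inf sup hg]; simp

theorem pv_sum_affine (cs : List (Int × Int)) :
    ((cs.map (fun p => 3 * (p.2 - p.1) + 1)).sum : Int)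
      = 3 * (cs.map (fun p => p.2 - p.1 + 1)).sum - 2 * cs.length := by
  induction cs with
  | nil => simp
  | cons p t ih => simp [ih]; ring

-- node-count bound: A's full output over a node has at most 3·size+1 entries
theorem pvExp_len_le (n : Nat) : ∀ (div inf sup : Int), (sup - inf).toNat ≤ n →
    pvGood div inf sup → (pvExp div inf sup).length ≤ 3 * (sup - inf).toNat + 1 := by
  induction n using Nat.strong_induction_on with
  | _ n ih =>
    intro div inf sup hn hg
    rw [pvExp_eq div inf sup hg]
    simp only [List.length_cons, List.length_flatMap]
    by_cases hle : sup ≤ inf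
    · rw [pvB_children_le div inf sup hle]; simp
    · have h1 : inf < sup := by omega
      obtain ⟨hd0, hd1⟩ := hg h1
      by_cases hdn : div < 0
      · rw [pvB_children_neg_div div inf sup hdn]; simp
      · have hdiv : 2 ≤ div := by omega
        by_cases h2 : sup - inf + 1 ≤ div
        · -- leaf subdivision: 1 + (sup-inf+1) entries
          unfold pvB_children
          rw [if_pos (by omega : inf ≠ sup), if_pos h2]
          have : ∀ i ∈ PySem.List.pyRange 0 (sup - inf + 1) 1,
              ((pvExp div (inf + i) (inf + i)).length) = 1 := by
            intro i _; unfold pvExp; simp [pvA_go]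
          rw [List.map_map]
          calc ((PySem.List.pyRange 0 (sup - inf + 1) 1).map
                  ((fun p : Int × Int => (pvExp div p.1 p.2).length) ∘ (fun i => (inf + i, inf + i)))).sum + 1
              ≤ ((PySem.List.pyRange 0 (sup - inf + 1) 1).map (fun _ => 1)).sum + 1 := by
                apply Nat.add_le_add_right
                apply List.sum_le_sum
                intro i hi
                simp only [Function.comp]
                rw [this i hi]
            _ ≤ 3 * (sup - inf).toNat + 1 := by
                simp [List.map_const', PySem.List.length_pyRange_one]
                omega
        · obtain ⟨hmem, hsum, hlen⟩ := pvB_children_rec div inf sup h1 h2 hdiv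
          set cs := pvB_children div inf sup with hcs
          -- each child is strictly smaller: bound by the induction hypothesis
          have hbound : ∀ p ∈ cs, (pvExp div p.1 p.2).length ≤ 3 * (p.2 - p.1).toNat + 1 := by
            intro p hp
            obtain ⟨hple, hplt, hpg⟩ := pvB_children_mem div inf sup hg p hp
            exact ih (p.2 - p.1).toNat (by omega) div p.1 p.2 le_rfl hpg
          have hs1N : (cs.map (fun p => (pvExp div p.1 p.2).length)).sum
              ≤ (cs.map (fun p => 3 * (p.2 - p.1).toNat + 1)).sum :=
            List.sum_le_sum hbound
          have hcast : (((cs.map (fun p => 3 * (p.2 - p.1).toNat + 1)).sum : Nat) : Int)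
              = (cs.map (fun p => 3 * (p.2 - p.1) + 1)).sum := by
            rw [Nat.cast_list_sum, List.map_map]
            congr 1
            apply List.map_congr_left
            intro p hp
            obtain ⟨hple, _⟩ := hmem p hp
            simp only [Function.comp]
            push_cast [Int.toNat_of_nonneg (by omega : (0:Int) ≤ p.2 - p.1)]
            ring
          have hZ : (((cs.map (fun p => (pvExp div p.1 p.2).length)).sum : Nat) : Int)
              ≤ 3 * (sup - inf) - 1 := by
            calc (((cs.map (fun p => (pvExp div p.1 p.2).length)).sum : Nat) : Int)
                ≤ (((cs.map (fun p => 3 * (p.2 - p.1).toNat + 1)).sum : Nat) : Int) := by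
                  exact_mod_cast hs1N
              _ = (cs.map (fun p => 3 * (p.2 - p.1) + 1)).sum := hcast
              _ = 3 * (cs.map (fun p => p.2 - p.1 + 1)).sum - 2 * cs.length := pv_sum_affine cs
              _ = 3 * (sup - inf + 1) - 2 * div := by rw [hsum, hlen]
              _ ≤ 3 * (sup - inf) - 1 := by omega
          have htn : ((sup - inf).toNat : Int) = sup - inf := Int.toNat_of_nonneg (by omega)
          omega

-- Source B's loop, run with enough fuel, appends the expansions of the stacked nodes in order
theorem pvB_loop_spec (div : Int) (fuel : Nat) :
    ∀ (stack acc : List (Int × Int)), (∀ p ∈ stack, pvGood div p.1 p.2) →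
    (stack.map (fun p => (pvExp div p.1 p.2).length)).sum ≤ fuel →
    pvB_loop div fuel stack acc = acc ++ stack.flatMap (fun p => pvExp div p.1 p.2) := by
  induction fuel with
  | zero =>
    intro stack acc hg hfuel
    match stack with
    | [] => simp [pvB_loop]
    | p :: rest =>
      exfalso
      have := pvExp_len_pos div p.1 p.2 (hg p (by simp))
      simp only [List.map_cons, List.sum_cons] at hfuel
      omega
  | succ fuel ih =>
    intro stack acc hg hfuel
    match stack with
    | [] => simp [pvB_loop]
    | (inf, sup) :: rest =>
      have hgood : pvGood div inf sup := hg (inf, sup) (by simp)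
      have hexp := pvExp_eq div inf sup hgood
      simp only [pvB_loop]
      rw [ih (pvB_children div inf sup ++ rest) (acc ++ [(inf, sup)]) ?_ ?_]
      · simp [hexp, List.flatMap_append, List.append_assoc]
      · intro p hp
        rcases List.mem_append.mp hp with hp | hp
        · exact (pvB_children_mem div inf sup hgood p hp).2.2
        · exact hg p (by simp [hp])
      · have hlen : ((pvB_children div inf sup).map (fun p => (pvExp div p.1 p.2).length)).sum
            = (pvExp div inf sup).length - 1 := by
          rw [hexp]; simp [List.length_flatMap]
        simp only [List.map_append, List.sum_append, hlen]
        have := pvExp_len_pos div inf sup hgood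
        simp only [List.map_cons, List.sum_cons] at hfuel
        omega

-- ===== VERDICT (by name: the statement is the Claim_ definition above) =====
theorem divide_y_venceras_recursivo_spec : Claim_equal_divide_y_venceras_recursivo := by
  intro inferior superior divisiones _ hpre
  unfold Spec_divide_y_venceras_recursivo divide_y_venceras_recursivo divide_y_venceras_recursivo_alt
  unfold Pre_divide_y_venceras_recursivo at hpre
  set p := pvRoot inferior superior with hp
  have hgood : pvGood divisiones p.1 p.2 := by
    intro hlt
    constructor <;> intro h <;> exact hpre ⟨by omega, hlt⟩
  have hlen := pvExp_len_le ((p.2 - p.1).toNat) divisiones p.1 p.2 le_rfl hgood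
  rw [pvB_loop_spec divisiones (3 * (p.2 - p.1).toNat + 2) [p] []
    (by intro q hq; simp at hq; subst hq; exact hgood)
    (by simp only [List.map_cons, List.map_nil, List.sum_cons, List.sum_nil]; omega)]
  show pvExp divisiones p.1 p.2 = [] ++ [p].flatMap (fun q => pvExp divisiones q.1 q.2)
  simp
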